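-- pv_equiv track=rewrite | github.com/SSAFY-9-S4-STUDY/SWEAB | day21/P_92344/P_92344_Gwanhyeong.py | solution
-- ===== SOURCE A (Python) =====
-- def solution(board, skill):
--     tmp = [[0] * (len(board) + 1) for _ in range(len(board)+1)]
--     ans = 0
--     # r1,c1 ~ r2,c2 에 누적합하기 위한 사전작업
--     for type, r1, c1, r2, c2, degree in skill:
--         tmp[r1][c1] += degree if type == 2 else -degree
--         tmp[r1][c2+1] += -degree if type == 2 else degree
--         tmp[r2+1][c1] += -degree if type == 2 else degree
--         tmp[r2+1][c2+1] += degree if type == 2 else -degree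
--
--     # 행 기준 누적합
--     for i in range(len(tmp) - 1):
--         for j in range(len(tmp) - 1):
--             tmp[i][j+1] += tmp[i][j]
--     # 열 기준 누적합
--     for j in range(len(tmp[0])-1):
--         for i in range(len(tmp)-1):
--             tmp[i+1][j] += tmp[i][j]
--
--     # 누적합 해준 tmp 2차원 배열을 더해주기만 하면 된다. O(1)
--     for i in range(len(board)):
--         for j in range(len(board[i])):
--             board[i][j] += tmp[i][j]
--             if board[i][j] > 0:
--                 ans += 1
--     return ans
-- ===== SOURCE B (Python) =====
-- def solution(board, skill):
--     # Apply each rectangle directly to the board, then count positive cells.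
--     for type, r1, c1, r2, c2, degree in skill:
--         delta = degree if type == 2 else -degree
--         for r in range(r1, r2 + 1):
--             for c in range(c1, c2 + 1):
--                 board[r][c] += delta
--     ans = 0
--     for row in board:
--         for v in row:
--             if v > 0:
--                 ans += 1
--     return ans
-- ===== Notes on version B (the rewrite author's own statement) =====
-- stated objective: simpler
-- what changed: B drops the 2-D difference array and its two prefix-sum sweeps entirely: it adds each skill's delta directly to every board cell of its rectangle and then counts positive cells in one sweep.
-- outside the precondition, e.g. on solution([[1, 1, 1], [1, 1, 1], [1, 1, 1]], [[2, 2, 0, 0, 0, 5]]): A returns 8, B returns 9; on solution([[0, 0], [0, 0]], [[2, -1, -1, -1, -1, 5]]): A returns 4, B returns 1; on solution([[1], [0, 0]], [[2, 0, 0, 1, 1, 5]]): A returns 3, B raises IndexError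
import Mathlib
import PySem

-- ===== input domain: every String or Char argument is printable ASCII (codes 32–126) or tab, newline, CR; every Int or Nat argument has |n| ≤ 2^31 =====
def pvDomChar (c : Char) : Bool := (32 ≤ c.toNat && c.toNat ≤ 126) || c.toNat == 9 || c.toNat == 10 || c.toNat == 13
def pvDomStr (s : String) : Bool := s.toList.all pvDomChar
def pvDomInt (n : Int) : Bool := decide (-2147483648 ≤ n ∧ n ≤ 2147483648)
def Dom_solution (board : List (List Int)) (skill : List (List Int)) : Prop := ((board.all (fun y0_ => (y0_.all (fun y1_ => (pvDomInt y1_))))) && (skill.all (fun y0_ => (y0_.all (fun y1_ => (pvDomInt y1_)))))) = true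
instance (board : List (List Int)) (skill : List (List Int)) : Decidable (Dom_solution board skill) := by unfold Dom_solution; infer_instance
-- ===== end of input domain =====

-- B replaces A's 2-D difference array and two prefix-sum sweeps by adding each skill's
-- delta directly to every board cell of its rectangle, then counting positives (simpler).
-- Both A and B mutate `board` in place in Python (identically inside Pre_); the theorems
-- here are about the return value.

-- ===== PORT A =====
-- `t[i][j] += v` (Python list-of-lists item update; exact for in-range indices, which Pre_ guarantees)
def add2 (t : List (List Int)) (i j v : Int) : List (List Int) :=
  PySem.List.pySetD t i
    (PySem.List.pySetD (PySem.List.pyGetD t i []) j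
      (PySem.List.pyGetD (PySem.List.pyGetD t i []) j 0 + v))

-- body of `for type, r1, c1, r2, c2, degree in skill:` — the four corner updates
-- (a row with ≠ 6 entries raises ValueError in Python; Pre_ excludes such inputs)
def stepSkillA (t : List (List Int)) (s : List Int) : List (List Int) :=
  match s with
  | [ty, r1, c1, r2, c2, deg] =>
    let t := add2 t r1 c1 (if ty = 2 then deg else -deg)
    let t := add2 t r1 (c2 + 1) (if ty = 2 then -deg else deg)
    let t := add2 t (r2 + 1) c1 (if ty = 2 then -deg else deg)
    add2 t (r2 + 1) (c2 + 1) (if ty = 2 then deg else -deg)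
  | _ => t

-- `tmp[i][j+1] += tmp[i][j]` over `for j in range(len(tmp)-1)` (row-wise prefix sums)
def rowStep (i : Int) (t : List (List Int)) (j : Int) : List (List Int) :=
  add2 t i (j + 1) (PySem.List.pyGetD (PySem.List.pyGetD t i []) j 0)
def rowPass (t : List (List Int)) (i : Int) : List (List Int) :=
  (PySem.List.pyRange 0 ((t.length : Int) - 1) 1).foldl (rowStep i) t

-- `tmp[i+1][j] += tmp[i][j]` over `for i in range(len(tmp)-1)` (column-wise prefix sums)
def colStep (j : Int) (t : List (List Int)) (i : Int) : List (List Int) :=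
  add2 t (i + 1) j (PySem.List.pyGetD (PySem.List.pyGetD t i []) j 0)
def colPass (t : List (List Int)) (j : Int) : List (List Int) :=
  (PySem.List.pyRange 0 ((t.length : Int) - 1) 1).foldl (colStep j) t

-- `board[i][j] += tmp[i][j]; if board[i][j] > 0: ans += 1`
def finStep (tmp : List (List Int)) (i : Int) (st : List (List Int) × Int) (j : Int) :
    List (List Int) × Int :=
  (add2 st.1 i j (PySem.List.pyGetD (PySem.List.pyGetD tmp i []) j 0),
   if 0 < PySem.List.pyGetD
       (PySem.List.pyGetD (add2 st.1 i j (PySem.List.pyGetD (PySem.List.pyGetD tmp i []) j 0)) i []) j 0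
   then st.2 + 1 else st.2)
def finRow (tmp : List (List Int)) (st : List (List Int) × Int) (i : Int) :
    List (List Int) × Int :=
  (PySem.List.pyRange 0 ((PySem.List.pyGetD st.1 i []).length : Int) 1).foldl (finStep tmp i) st

def solution (board : List (List Int)) (skill : List (List Int)) : Int :=
  let tmp0 := (List.range (board.length + 1)).map (fun _ => List.replicate (board.length + 1) (0 : Int))
  let tmp1 := skill.foldl stepSkillA tmp0
  let tmp2 := (PySem.List.pyRange 0 ((tmp1.length : Int) - 1) 1).foldl rowPass tmp1
  let tmp3 := (PySem.List.pyRange 0 (((PySem.List.pyGetD tmp2 0 []).length : Int) - 1) 1).foldl colPass tmp2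
  let fin := (PySem.List.pyRange 0 (board.length : Int) 1).foldl (finRow tmp3) (board, 0)
  fin.2

-- ===== PORT B =====
-- `board[r][c] += delta` over `for c in range(c1, c2+1)`
def bumpC (delta r : Int) (b : List (List Int)) (c : Int) : List (List Int) :=
  add2 b r c delta
def bumpR (delta c1 c2 : Int) (b : List (List Int)) (r : Int) : List (List Int) :=
  (PySem.List.pyRange c1 (c2 + 1) 1).foldl (bumpC delta r) b
def stepSkillB (b : List (List Int)) (s : List Int) : List (List Int) :=
  match s with
  | [ty, r1, c1, r2, c2, deg] =>
    (PySem.List.pyRange r1 (r2 + 1) 1).foldl (bumpR (if ty = 2 then deg else -deg) c1 c2) b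
  | _ => b
def countRow (a : Int) (row : List Int) : Int :=
  row.foldl (fun a v => if 0 < v then a + 1 else a) a

def solution_alt (board : List (List Int)) (skill : List (List Int)) : Int :=
  (skill.foldl stepSkillB board).foldl countRow 0

-- ===== PRECONDITION & SPEC =====
-- Pre_ restricts to the puzzle's intended inputs: rows no wider than n+1, and skills
-- [type, r1, c1, r2, c2, degree] with 0 ≤ r1 ≤ r2 < n, 0 ≤ c1 ≤ c2 < n, every touched row
-- long enough for its rectangle.  Outside it A raises (out-of-range corner index, over-wide
-- rows, malformed skill rows), B raises (a rectangle over a too-short row), or A's value is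
-- an accident of the difference array (negative indices wrap around, inverted rectangles
-- leave a sign-flipped residue band).
def Pre_solution (board : List (List Int)) (skill : List (List Int)) : Prop :=
  (∀ row ∈ board, row.length ≤ board.length + 1) ∧
  ∀ s ∈ skill, s.length = 6 ∧
    0 ≤ s.getD 1 0 ∧ s.getD 1 0 ≤ s.getD 3 0 ∧ s.getD 3 0 < (board.length : Int) ∧
    0 ≤ s.getD 2 0 ∧ s.getD 2 0 ≤ s.getD 4 0 ∧ s.getD 4 0 < (board.length : Int) ∧
    ∀ i ∈ List.range board.length,
      s.getD 1 0 ≤ (i : Int) → (i : Int) ≤ s.getD 3 0 →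
        s.getD 4 0 < ((board.getD i []).length : Int)
instance (board : List (List Int)) (skill : List (List Int)) : Decidable (Pre_solution board skill) := by
  unfold Pre_solution; infer_instance

def pvWitness_solution : List (List Int) × List (List Int) := ([[1, -1], [0, 2]], [[2, 0, 0, 1, 1, 1], [1, 0, 1, 0, 1, 3]])

def Spec_solution (board : List (List Int)) (skill : List (List Int)) (out : Int) : Prop := out = solution_alt board skill
instance (board : List (List Int)) (skill : List (List Int)) (out : Int) : Decidable (Spec_solution board skill out) := by unfold Spec_solution; infer_instance

-- ===== CLAIM (what is proved, stated in full; the proofs are below) =====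
def Claim_equal_solution : Prop := ∀ (board : List (List Int)) (skill : List (List Int)), Dom_solution board skill → Pre_solution board skill → Spec_solution board skill (solution board skill)

-- ===== LEMMAS AND PROOFS =====

-- value of cell (i, j); 0 outside the grid
def g2 (t : List (List Int)) (i j : ℕ) : Int := (t.getD i []).getD j 0
-- shape: R rows, each of length C
def Sh (t : List (List Int)) (R C : ℕ) : Prop := t.length = R ∧ ∀ r ∈ t, r.length = C

theorem pyGetD_nn {α : Type} (xs : List α) (i : Int) (d : α) (h : 0 ≤ i) :
    PySem.List.pyGetD xs i d = xs.getD i.toNat d := by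
  rw [show i = (i.toNat : Int) by omega, PySem.List.pyGetD_natCast]
  congr 1

theorem getD_set {α : Type} (l : List α) (n i : ℕ) (x d) :
    (l.set n x).getD i d = if n = i ∧ n < l.length then x else l.getD i d := by
  rw [List.getD_eq_getElem?_getD, List.getElem?_set, List.getD_eq_getElem?_getD]
  split_ifs with h1 h2 h3 h3 <;> first | rfl | omega | simp_all

theorem read_eq_g2 (t : List (List Int)) (i j : Int) (hi : 0 ≤ i) (hj : 0 ≤ j) :
    PySem.List.pyGetD (PySem.List.pyGetD t i []) j 0 = g2 t i.toNat j.toNat := by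
  rw [pyGetD_nn _ _ _ hi, pyGetD_nn _ _ _ hj]; rfl

theorem getD_row {t : List (List Int)} {R C : ℕ} (ht : Sh t R C) {i : ℕ} (hi : i < R) :
    (t.getD i []).length = C := by
  obtain ⟨hlen, hrow⟩ := ht
  have h : i < t.length := by omega
  rw [List.getD_eq_getElem?_getD, List.getElem?_eq_getElem h]
  exact hrow _ (List.getElem_mem h)

theorem Sh_add2 (t : List (List Int)) (R C : ℕ) (ht : Sh t R C) (a b v : Int) (ha : 0 ≤ a) :
    Sh (add2 t a b v) R C := by
  obtain ⟨hlen, hrow⟩ := ht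
  unfold add2
  rw [PySem.List.pySetD_of_nonneg _ _ ha]
  by_cases hR : a.toNat < t.length
  · refine ⟨by simpa using hlen, ?_⟩
    intro r hr
    rcases List.mem_or_eq_of_mem_set hr with h | h
    · exact hrow r h
    · subst h
      rw [pyGetD_nn _ _ _ ha, PySem.List.length_pySetD]
      exact getD_row ⟨hlen, hrow⟩ (by omega)
  · rw [List.set_eq_of_length_le (by omega)]
    exact ⟨hlen, hrow⟩

def lenR (t : List (List Int)) (i : ℕ) : ℕ := (t.getD i []).length

theorem len_add2 (t : List (List Int)) (a b v : Int) : (add2 t a b v).length = t.length := by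
  unfold add2
  rw [PySem.List.length_pySetD]

theorem lenR_add2 (t : List (List Int)) (a b v : Int) (ha : 0 ≤ a) (i : ℕ) :
    lenR (add2 t a b v) i = lenR t i := by
  unfold add2 lenR
  rw [PySem.List.pySetD_of_nonneg _ _ ha, getD_set]
  split_ifs with h
  · rw [← h.1, PySem.List.length_pySetD, pyGetD_nn _ _ _ ha]
  · rfl

theorem g2_add2g (t : List (List Int)) (a b v : Int)
    (ha : 0 ≤ a) (haR : a < (t.length : Int)) (hb : 0 ≤ b)
    (hbC : b < ((t.getD a.toNat []).length : Int)) (i j : ℕ) :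
    g2 (add2 t a b v) i j = if (i : Int) = a ∧ (j : Int) = b then g2 t i j + v else g2 t i j := by
  have hR : a.toNat < t.length := by omega
  have hC : b.toNat < (t.getD a.toNat []).length := by omega
  unfold add2
  rw [PySem.List.pySetD_of_nonneg _ _ ha, pyGetD_nn _ _ _ ha,
    PySem.List.pySetD_of_nonneg _ _ hb, pyGetD_nn _ _ _ hb]
  unfold g2
  rw [getD_set]
  by_cases h1 : a.toNat = i ∧ a.toNat < t.length
  · rw [if_pos h1, getD_set]
    obtain ⟨h1a, -⟩ := h1
    subst h1a
    by_cases h2 : b.toNat = j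
    · subst h2
      rw [if_pos ⟨rfl, hC⟩, if_pos ⟨by omega, by omega⟩]
    · rw [if_neg (fun hh => h2 hh.1), if_neg (by rintro ⟨-, hh⟩; exact h2 (by omega))]
  · rw [if_neg h1, if_neg (by omega)]

theorem g2_add2 (t : List (List Int)) (R C : ℕ) (ht : Sh t R C) (a b v : Int)
    (ha : 0 ≤ a) (haR : a < R) (hb : 0 ≤ b) (hbC : b < C) (i j : ℕ) :
    g2 (add2 t a b v) i j = if (i : Int) = a ∧ (j : Int) = b then g2 t i j + v else g2 t i j := by
  refine g2_add2g t a b v ha ?_ hb ?_ i j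
  · rw [ht.1]
    exact haR
  · rw [getD_row ht (show a.toNat < R by omega)]
    exact hbC

-- reference values
def cornerTerm (s : List Int) (i j : ℕ) : Int :=
  match s with
  | [ty, r1, c1, r2, c2, deg] =>
    let d := if ty = 2 then deg else -deg
    (if (i : Int) = r1 ∧ (j : Int) = c1 then d else 0)
      + (if (i : Int) = r1 ∧ (j : Int) = c2 + 1 then -d else 0)
      + (if (i : Int) = r2 + 1 ∧ (j : Int) = c1 then -d else 0)
      + (if (i : Int) = r2 + 1 ∧ (j : Int) = c2 + 1 then d else 0)
  | _ => 0
def corners (skill : List (List Int)) (i j : ℕ) : Int := (skill.map (fun s => cornerTerm s i j)).sum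
def rectTerm (s : List Int) (i j : ℕ) : Int :=
  match s with
  | [ty, r1, c1, r2, c2, deg] =>
    if r1 ≤ (i : Int) ∧ (i : Int) ≤ r2 ∧ c1 ≤ (j : Int) ∧ (j : Int) ≤ c2 then
      (if ty = 2 then deg else -deg) else 0
  | _ => 0
def rect (skill : List (List Int)) (i j : ℕ) : Int := (skill.map (fun s => rectTerm s i j)).sum
def rowP (t : List (List Int)) (i j : ℕ) : Int := ∑ k ∈ Finset.range (j + 1), g2 t i k
def colP (t : List (List Int)) (i j : ℕ) : Int := ∑ k ∈ Finset.range (i + 1), g2 t k j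

def skOK (n : ℕ) (s : List Int) : Prop :=
  s.length = 6 ∧ 0 ≤ s.getD 1 0 ∧ s.getD 1 0 ≤ s.getD 3 0 ∧ s.getD 3 0 < (n : Int) ∧
    0 ≤ s.getD 2 0 ∧ s.getD 2 0 ≤ s.getD 4 0 ∧ s.getD 4 0 < (n : Int)
-- the skill's rectangle stays inside the (possibly ragged) rows of `board`
def skCov (board : List (List Int)) (s : List Int) : Prop :=
  ∀ i ∈ List.range board.length,
    s.getD 1 0 ≤ (i : Int) → (i : Int) ≤ s.getD 3 0 →
      s.getD 4 0 < ((board.getD i []).length : Int)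

-- ---- A side ----
theorem stepSkillA_spec (n : ℕ) (t : List (List Int)) (ht : Sh t (n+1) (n+1))
    (s : List Int) (hs : skOK n s) :
    Sh (stepSkillA t s) (n+1) (n+1) ∧
      ∀ i j : ℕ, g2 (stepSkillA t s) i j = g2 t i j + cornerTerm s i j := by
  obtain ⟨hlen6, hs1⟩ := hs
  rcases s with - | ⟨ty, - | ⟨r1, - | ⟨c1, - | ⟨r2, - | ⟨c2, - | ⟨deg, - | ⟨x, rest⟩⟩⟩⟩⟩⟩⟩ <;>
    simp only [List.length] at hlen6 <;> try omega
  simp only [List.getD, List.getElem?_cons_succ, List.getElem?_cons_zero, Option.getD_some] at hs1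
  obtain ⟨h1, h2, h3, h4, h5, h6⟩ := hs1
  have hb1 : (0:Int) ≤ r1 := h1
  have hb2 : r1 < (n:Int) + 1 := by omega
  have hb3 : (0:Int) ≤ c1 := h4
  have hb4 : c1 < (n:Int) + 1 := by omega
  have hb5 : (0:Int) ≤ r2 + 1 := by omega
  have hb6 : r2 + 1 < (n:Int) + 1 := by omega
  have hb7 : (0:Int) ≤ c2 + 1 := by omega
  have hb8 : c2 + 1 < (n:Int) + 1 := by omega
  simp only [stepSkillA]
  have hS1 := Sh_add2 t (n+1) (n+1) ht r1 c1 (if ty = 2 then deg else -deg) hb1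
  have hS2 := Sh_add2 _ (n+1) (n+1) hS1 r1 (c2+1) (if ty = 2 then -deg else deg) hb1
  have hS3 := Sh_add2 _ (n+1) (n+1) hS2 (r2+1) c1 (if ty = 2 then -deg else deg) hb5
  have hS4 := Sh_add2 _ (n+1) (n+1) hS3 (r2+1) (c2+1) (if ty = 2 then deg else -deg) hb5
  refine ⟨hS4, fun i j => ?_⟩
  rw [g2_add2 _ (n+1) (n+1) hS3 _ _ _ hb5 (by push_cast; omega) hb7 (by push_cast; omega),
      g2_add2 _ (n+1) (n+1) hS2 _ _ _ hb5 (by push_cast; omega) hb3 (by push_cast; omega),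
      g2_add2 _ (n+1) (n+1) hS1 _ _ _ hb1 (by push_cast; omega) hb7 (by push_cast; omega),
      g2_add2 _ (n+1) (n+1) ht _ _ _ hb1 (by push_cast; omega) hb3 (by push_cast; omega)]
  simp only [cornerTerm]
  split_ifs <;> omega

theorem skillFoldA (n : ℕ) (skill : List (List Int)) (hsk : ∀ s ∈ skill, skOK n s)
    (t : List (List Int)) (ht : Sh t (n+1) (n+1)) :
    Sh (skill.foldl stepSkillA t) (n+1) (n+1) ∧
      ∀ i j : ℕ, g2 (skill.foldl stepSkillA t) i j = g2 t i j + corners skill i j := by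
  induction skill generalizing t with
  | nil => exact ⟨ht, fun i j => by simp [corners]⟩
  | cons s rest ih =>
    have hstep := stepSkillA_spec n t ht s (hsk s (by simp))
    have hrest := ih (fun s' hs' => hsk s' (by simp [hs'])) _ hstep.1
    refine ⟨hrest.1, fun i j => ?_⟩
    simp only [List.foldl_cons] at *
    rw [hrest.2, hstep.2]
    simp [corners]
    ring

theorem rowP_succ (t : List (List Int)) (i j : ℕ) :
    rowP t i (j + 1) = rowP t i j + g2 t i (j + 1) := Finset.sum_range_succ _ _

theorem colP_succ (t : List (List Int)) (i j : ℕ) :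
    colP t (i + 1) j = colP t i j + g2 t (i + 1) j := Finset.sum_range_succ _ _

theorem rowFold_aux (n : ℕ) (t : List (List Int)) (ht : Sh t (n+1) (n+1))
    (I : Int) (hI : 0 ≤ I) (hIn : I < (n : Int) + 1) (m : ℕ) (hm : m ≤ n) :
    Sh ((PySem.List.pyRange 0 (m : Int) 1).foldl (rowStep I) t) (n+1) (n+1) ∧
      ∀ i j : ℕ, g2 ((PySem.List.pyRange 0 (m : Int) 1).foldl (rowStep I) t) i j =
        if (i : Int) = I ∧ j ≤ m then rowP t i j else g2 t i j := by
  induction m with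
  | zero =>
    rw [Nat.cast_zero, PySem.List.pyRange_one_eq_nil le_rfl]
    refine ⟨ht, fun i j => ?_⟩
    simp only [List.foldl_nil]
    split_ifs with h
    · obtain ⟨-, hj⟩ := h
      have hj0 : j = 0 := by omega
      subst hj0
      simp [rowP]
    · rfl
  | succ m ihm =>
    have hm' : m ≤ n := by omega
    obtain ⟨ihSh, ihg⟩ := ihm hm'
    have hsplit : PySem.List.pyRange 0 ((m + 1 : ℕ) : Int) 1 =
        PySem.List.pyRange 0 ((m : ℕ) : Int) 1 ++ [(m : Int)] := by
      push_cast
      exact PySem.List.pyRange_one_succ_right (by omega)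
    rw [hsplit, List.foldl_append]
    simp only [List.foldl_cons, List.foldl_nil]
    set F := (PySem.List.pyRange 0 ((m : ℕ) : Int) 1).foldl (rowStep I) t with hF
    have hread : PySem.List.pyGetD (PySem.List.pyGetD F I []) (m : Int) 0 = rowP t I.toNat m := by
      rw [read_eq_g2 _ _ _ hI (by omega), Int.toNat_natCast, ihg I.toNat m,
        if_pos ⟨by omega, le_rfl⟩]
    have hSh' : Sh (rowStep I F (m : Int)) (n+1) (n+1) := Sh_add2 _ _ _ ihSh _ _ _ hI
    refine ⟨hSh', fun i j => ?_⟩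
    unfold rowStep
    rw [hread, g2_add2 _ (n+1) (n+1) ihSh I ((m : Int) + 1) _ hI (by exact_mod_cast hIn)
      (by omega) (by push_cast; omega)]
    by_cases hij : (i : Int) = I ∧ (j : Int) = (m : Int) + 1
    · rw [if_pos hij]
      have hiI : (i : Int) = I := hij.1
      have hj : j = m + 1 := by omega
      subst hj
      rw [ihg i (m+1), if_neg (by omega), if_pos ⟨hiI, le_rfl⟩,
        show I.toNat = i by omega, rowP_succ]
      ring
    · rw [if_neg hij, ihg i j]
      by_cases hc : (i : Int) = I ∧ j ≤ m
      · rw [if_pos hc, if_pos ⟨hc.1, by omega⟩]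
      · rw [if_neg hc, if_neg ?_]
        rintro ⟨hA, hB⟩
        by_cases hjm : j ≤ m
        · exact hc ⟨hA, hjm⟩
        · exact hij ⟨hA, by omega⟩

theorem rowOuter (n : ℕ) (t0 : List (List Int)) (ht : Sh t0 (n+1) (n+1)) (M : ℕ) (hM : M ≤ n) :
    Sh ((PySem.List.pyRange 0 (M : Int) 1).foldl rowPass t0) (n+1) (n+1) ∧
      ∀ i j : ℕ, j ≤ n → g2 ((PySem.List.pyRange 0 (M : Int) 1).foldl rowPass t0) i j =
        if (i : Int) < M then rowP t0 i j else g2 t0 i j := by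
  induction M with
  | zero =>
    rw [Nat.cast_zero, PySem.List.pyRange_one_eq_nil le_rfl]
    exact ⟨ht, fun i j _ => by rw [List.foldl_nil, if_neg (by omega)]⟩
  | succ M ihM =>
    have hM' : M ≤ n := by omega
    obtain ⟨ihSh, ihg⟩ := ihM hM'
    have hsplit : PySem.List.pyRange 0 ((M + 1 : ℕ) : Int) 1 =
        PySem.List.pyRange 0 ((M : ℕ) : Int) 1 ++ [(M : Int)] := by
      push_cast
      exact PySem.List.pyRange_one_succ_right (by omega)
    rw [hsplit, List.foldl_append]
    simp only [List.foldl_cons, List.foldl_nil]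
    set F := (PySem.List.pyRange 0 ((M : ℕ) : Int) 1).foldl rowPass t0 with hF
    have hlen : ((F.length : Int) - 1) = ((n : ℕ) : Int) := by rw [ihSh.1]; push_cast; ring
    have haux := rowFold_aux n F ihSh (M : Int) (by omega) (by omega) n le_rfl
    have hpass : rowPass F (M : Int) = (PySem.List.pyRange 0 ((n : ℕ) : Int) 1).foldl (rowStep (M : Int)) F := by
      rw [rowPass, hlen]
    rw [hpass]
    refine ⟨haux.1, fun i j hj => ?_⟩
    rw [haux.2 i j]
    by_cases hiM : (i : Int) = (M : Int)
    · rw [if_pos ⟨hiM, hj⟩, if_pos (by omega)]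
      have hiM' : i = M := by omega
      subst hiM'
      rw [rowP]
      have : ∀ k ∈ Finset.range (j + 1), g2 F i k = g2 t0 i k := by
        intro k hk
        rw [ihg i k (by simp at hk; omega), if_neg (by omega)]
      rw [Finset.sum_congr rfl this]
      rfl
    · rw [if_neg (by rintro ⟨h1, -⟩; exact hiM h1), ihg i j hj]
      by_cases hlt : (i : Int) < M
      · rw [if_pos hlt, if_pos (by omega)]
      · rw [if_neg hlt, if_neg (by omega)]

theorem colFold_aux (n : ℕ) (t : List (List Int)) (ht : Sh t (n+1) (n+1))
    (J : Int) (hJ : 0 ≤ J) (hJn : J < (n : Int) + 1) (m : ℕ) (hm : m ≤ n) :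
    Sh ((PySem.List.pyRange 0 (m : Int) 1).foldl (colStep J) t) (n+1) (n+1) ∧
      ∀ i j : ℕ, g2 ((PySem.List.pyRange 0 (m : Int) 1).foldl (colStep J) t) i j =
        if (j : Int) = J ∧ i ≤ m then colP t i j else g2 t i j := by
  induction m with
  | zero =>
    rw [Nat.cast_zero, PySem.List.pyRange_one_eq_nil le_rfl]
    refine ⟨ht, fun i j => ?_⟩
    simp only [List.foldl_nil]
    split_ifs with h
    · obtain ⟨-, hi⟩ := h
      have hi0 : i = 0 := by omega
      subst hi0
      simp [colP]
    · rfl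
  | succ m ihm =>
    have hm' : m ≤ n := by omega
    obtain ⟨ihSh, ihg⟩ := ihm hm'
    have hsplit : PySem.List.pyRange 0 ((m + 1 : ℕ) : Int) 1 =
        PySem.List.pyRange 0 ((m : ℕ) : Int) 1 ++ [(m : Int)] := by
      push_cast
      exact PySem.List.pyRange_one_succ_right (by omega)
    rw [hsplit, List.foldl_append]
    simp only [List.foldl_cons, List.foldl_nil]
    set F := (PySem.List.pyRange 0 ((m : ℕ) : Int) 1).foldl (colStep J) t with hF
    have hread : PySem.List.pyGetD (PySem.List.pyGetD F (m : Int) []) J 0 = colP t m J.toNat := by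
      rw [read_eq_g2 _ _ _ (by omega) hJ, Int.toNat_natCast, ihg m J.toNat,
        if_pos ⟨by omega, le_rfl⟩]
    have hSh' : Sh (colStep J F (m : Int)) (n+1) (n+1) := Sh_add2 _ _ _ ihSh _ _ _ (by omega)
    refine ⟨hSh', fun i j => ?_⟩
    unfold colStep
    rw [hread, g2_add2 _ (n+1) (n+1) ihSh ((m : Int) + 1) J _ (by omega) (by push_cast; omega)
      hJ (by exact_mod_cast hJn)]
    by_cases hij : (i : Int) = (m : Int) + 1 ∧ (j : Int) = J
    · rw [if_pos hij]
      have hjJ : (j : Int) = J := hij.2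
      have hi : i = m + 1 := by omega
      subst hi
      rw [ihg (m+1) j, if_neg (by omega), if_pos ⟨hjJ, le_rfl⟩,
        show J.toNat = j by omega, colP_succ]
      ring
    · rw [if_neg hij, ihg i j]
      by_cases hc : (j : Int) = J ∧ i ≤ m
      · rw [if_pos hc, if_pos ⟨hc.1, by omega⟩]
      · rw [if_neg hc, if_neg ?_]
        rintro ⟨hA, hB⟩
        by_cases him : i ≤ m
        · exact hc ⟨hA, him⟩
        · exact hij ⟨by omega, hA⟩

theorem colOuter (n : ℕ) (t0 : List (List Int)) (ht : Sh t0 (n+1) (n+1)) (M : ℕ) (hM : M ≤ n) :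
    Sh ((PySem.List.pyRange 0 (M : Int) 1).foldl colPass t0) (n+1) (n+1) ∧
      ∀ i j : ℕ, i ≤ n → g2 ((PySem.List.pyRange 0 (M : Int) 1).foldl colPass t0) i j =
        if (j : Int) < M then colP t0 i j else g2 t0 i j := by
  induction M with
  | zero =>
    rw [Nat.cast_zero, PySem.List.pyRange_one_eq_nil le_rfl]
    exact ⟨ht, fun i j _ => by rw [List.foldl_nil, if_neg (by omega)]⟩
  | succ M ihM =>
    have hM' : M ≤ n := by omega
    obtain ⟨ihSh, ihg⟩ := ihM hM'
    have hsplit : PySem.List.pyRange 0 ((M + 1 : ℕ) : Int) 1 =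
        PySem.List.pyRange 0 ((M : ℕ) : Int) 1 ++ [(M : Int)] := by
      push_cast
      exact PySem.List.pyRange_one_succ_right (by omega)
    rw [hsplit, List.foldl_append]
    simp only [List.foldl_cons, List.foldl_nil]
    set F := (PySem.List.pyRange 0 ((M : ℕ) : Int) 1).foldl colPass t0 with hF
    have hlen : ((F.length : Int) - 1) = ((n : ℕ) : Int) := by rw [ihSh.1]; push_cast; ring
    have haux := colFold_aux n F ihSh (M : Int) (by omega) (by omega) n le_rfl
    have hpass : colPass F (M : Int) = (PySem.List.pyRange 0 ((n : ℕ) : Int) 1).foldl (colStep (M : Int)) F := by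
      rw [colPass, hlen]
    rw [hpass]
    refine ⟨haux.1, fun i j hi => ?_⟩
    rw [haux.2 i j]
    by_cases hjM : (j : Int) = (M : Int)
    · rw [if_pos ⟨hjM, hi⟩, if_pos (by omega)]
      have hjM' : j = M := by omega
      subst hjM'
      rw [colP]
      have : ∀ k ∈ Finset.range (i + 1), g2 F k j = g2 t0 k j := by
        intro k hk
        rw [ihg k j (by simp at hk; omega), if_neg (by omega)]
      rw [Finset.sum_congr rfl this]
      rfl
    · rw [if_neg (by rintro ⟨h1, -⟩; exact hjM h1), ihg i j hi]
      by_cases hlt : (j : Int) < M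
      · rw [if_pos hlt, if_pos (by omega)]
      · rw [if_neg hlt, if_neg (by omega)]

theorem sum_ite_eq_left (m : ℕ) (a x : Int) :
    (∑ k ∈ Finset.range m, if (k : Int) = a then x else 0) =
      if 0 ≤ a ∧ a < m then x else 0 := by
  induction m with
  | zero => simp
  | succ m ih =>
    rw [Finset.sum_range_succ, ih]
    split_ifs <;> push_cast at * <;> omega

theorem sum_ite_and_right (m : ℕ) (p : Prop) [Decidable p] (b x : Int) :
    (∑ l ∈ Finset.range m, if p ∧ (l : Int) = b then x else 0) =
      if p ∧ 0 ≤ b ∧ b < m then x else 0 := by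
  by_cases hp : p
  · simp only [hp, true_and]
    exact sum_ite_eq_left m b x
  · simp [hp]

theorem sum_ite_and_left (m : ℕ) (a : Int) (q : Prop) [Decidable q] (x : Int) :
    (∑ k ∈ Finset.range m, if (k : Int) = a ∧ q then x else 0) =
      if (0 ≤ a ∧ a < m) ∧ q then x else 0 := by
  by_cases hq : q
  · simp only [hq, and_true]
    exact sum_ite_eq_left m a x
  · simp [hq]

theorem doubleSum_corner (n : ℕ) (s : List Int) (hs : skOK n s) (i j : ℕ) :
    (∑ k ∈ Finset.range (i + 1), ∑ l ∈ Finset.range (j + 1), cornerTerm s k l) =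
      rectTerm s i j := by
  obtain ⟨hlen6, hs1⟩ := hs
  rcases s with - | ⟨ty, - | ⟨r1, - | ⟨c1, - | ⟨r2, - | ⟨c2, - | ⟨deg, - | ⟨x, rest⟩⟩⟩⟩⟩⟩⟩ <;>
    simp only [List.length] at hlen6 <;> try omega
  simp only [List.getD, List.getElem?_cons_succ, List.getElem?_cons_zero, Option.getD_some] at hs1
  obtain ⟨h1, h2, h3, h4, h5, h6⟩ := hs1
  have inner : ∀ k : ℕ, (∑ l ∈ Finset.range (j + 1), cornerTerm [ty, r1, c1, r2, c2, deg] k l) =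
      (if (k : Int) = r1 ∧ (0 ≤ c1 ∧ c1 < ((j + 1 : ℕ) : Int)) then (if ty = 2 then deg else -deg) else 0)
      + (if (k : Int) = r1 ∧ (0 ≤ c2 + 1 ∧ c2 + 1 < ((j + 1 : ℕ) : Int)) then -(if ty = 2 then deg else -deg) else 0)
      + (if (k : Int) = r2 + 1 ∧ (0 ≤ c1 ∧ c1 < ((j + 1 : ℕ) : Int)) then -(if ty = 2 then deg else -deg) else 0)
      + (if (k : Int) = r2 + 1 ∧ (0 ≤ c2 + 1 ∧ c2 + 1 < ((j + 1 : ℕ) : Int)) then (if ty = 2 then deg else -deg) else 0) := by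
    intro k
    simp only [cornerTerm]
    rw [Finset.sum_add_distrib, Finset.sum_add_distrib, Finset.sum_add_distrib,
      sum_ite_and_right, sum_ite_and_right, sum_ite_and_right, sum_ite_and_right]
  rw [Finset.sum_congr rfl (fun k _ => inner k)]
  simp only [Finset.sum_add_distrib]
  rw [sum_ite_and_left, sum_ite_and_left, sum_ite_and_left, sum_ite_and_left]
  simp only [rectTerm]
  split_ifs <;> push_cast at * <;> omega

theorem corner_row_sum (n : ℕ) (s : List Int) (hs : skOK n s) (k : ℕ) :
    (∑ l ∈ Finset.range (n + 1), cornerTerm s k l) = 0 := by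
  obtain ⟨hlen6, hs1⟩ := hs
  rcases s with - | ⟨ty, - | ⟨r1, - | ⟨c1, - | ⟨r2, - | ⟨c2, - | ⟨deg, - | ⟨x, rest⟩⟩⟩⟩⟩⟩⟩ <;>
    simp only [List.length] at hlen6 <;> try omega
  simp only [List.getD, List.getElem?_cons_succ, List.getElem?_cons_zero, Option.getD_some] at hs1
  obtain ⟨h1, h2, h3, h4, h5, h6⟩ := hs1
  simp only [cornerTerm]
  rw [Finset.sum_add_distrib, Finset.sum_add_distrib, Finset.sum_add_distrib,
    sum_ite_and_right, sum_ite_and_right, sum_ite_and_right, sum_ite_and_right]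
  split_ifs <;> push_cast at * <;> omega

theorem rectTerm_big (n : ℕ) (s : List Int) (hs : skOK n s) (i : ℕ) :
    rectTerm s i n = 0 := by
  obtain ⟨hlen6, hs1⟩ := hs
  rcases s with - | ⟨ty, - | ⟨r1, - | ⟨c1, - | ⟨r2, - | ⟨c2, - | ⟨deg, - | ⟨x, rest⟩⟩⟩⟩⟩⟩⟩ <;>
    simp only [List.length] at hlen6 <;> try omega
  simp only [List.getD, List.getElem?_cons_succ, List.getElem?_cons_zero, Option.getD_some] at hs1
  obtain ⟨h1, h2, h3, h4, h5, h6⟩ := hs1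
  simp only [rectTerm]
  rw [if_neg (by rintro ⟨-, -, -, hh⟩; omega)]

theorem finRow_aux (tm : List (List Int)) (I : Int) (hI : 0 ≤ I)
    (m : ℕ) (st : List (List Int) × Int) (hIl : I < (st.1.length : Int))
    (hm : (m : Int) ≤ ((st.1.getD I.toNat []).length : Int)) :
    ((PySem.List.pyRange 0 (m : Int) 1).foldl (finStep tm I) st).1.length = st.1.length ∧
      (∀ i : ℕ, lenR ((PySem.List.pyRange 0 (m : Int) 1).foldl (finStep tm I) st).1 i = lenR st.1 i) ∧
      (∀ i j : ℕ, g2 ((PySem.List.pyRange 0 (m : Int) 1).foldl (finStep tm I) st).1 i j =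
        if (i : Int) = I ∧ j < m then g2 st.1 i j + g2 tm i j else g2 st.1 i j) ∧
      ((PySem.List.pyRange 0 (m : Int) 1).foldl (finStep tm I) st).2 =
        st.2 + ∑ j ∈ Finset.range m,
          (if 0 < g2 st.1 I.toNat j + g2 tm I.toNat j then 1 else 0) := by
  induction m with
  | zero =>
    rw [Nat.cast_zero, PySem.List.pyRange_one_eq_nil le_rfl]
    refine ⟨rfl, fun i => rfl, fun i j => ?_, by simp⟩
    rw [List.foldl_nil, if_neg (by omega)]
  | succ m ihm =>
    obtain ⟨ihL, ihP, ihg, iha⟩ := ihm (by push_cast at hm ⊢; omega)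
    have hsplit : PySem.List.pyRange 0 ((m + 1 : ℕ) : Int) 1 =
        PySem.List.pyRange 0 ((m : ℕ) : Int) 1 ++ [(m : Int)] := by
      push_cast
      exact PySem.List.pyRange_one_succ_right (by omega)
    rw [hsplit, List.foldl_append]
    simp only [List.foldl_cons, List.foldl_nil]
    set F := (PySem.List.pyRange 0 ((m : ℕ) : Int) 1).foldl (finStep tm I) st with hF
    have hrd : PySem.List.pyGetD (PySem.List.pyGetD tm I []) (m : Int) 0 = g2 tm I.toNat m := by
      rw [read_eq_g2 _ _ _ hI (by omega), Int.toNat_natCast]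
    have hFl : (F.1.length : Int) = (st.1.length : Int) := by rw [ihL]
    have hFr : ((F.1.getD I.toNat []).length : Int) = ((st.1.getD I.toNat []).length : Int) := by
      have := ihP I.toNat
      unfold lenR at this
      rw [this]
    have hgadd : ∀ i j : ℕ, g2 (add2 F.1 I (m : Int) (g2 tm I.toNat m)) i j =
        if (i : Int) = I ∧ (j : Int) = (m : Int) then g2 F.1 i j + g2 tm I.toNat m
        else g2 F.1 i j := by
      intro i j
      exact g2_add2g F.1 I (m : Int) _ hI (by omega) (by omega)
        (by rw [hFr]; push_cast at hm ⊢; omega) i j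
    have hrd2 : PySem.List.pyGetD
        (PySem.List.pyGetD (add2 F.1 I (m : Int) (g2 tm I.toNat m)) I []) (m : Int) 0 =
        g2 st.1 I.toNat m + g2 tm I.toNat m := by
      rw [read_eq_g2 _ _ _ hI (by omega), Int.toNat_natCast, hgadd, if_pos ⟨by omega, rfl⟩,
        ihg I.toNat m, if_neg (by omega)]
    simp only [finStep, hrd]
    refine ⟨?_, fun i => ?_, fun i j => ?_, ?_⟩
    · rw [len_add2, ihL]
    · rw [lenR_add2 _ _ _ _ hI, ihP i]
    · rw [hgadd i j]
      by_cases hij : (i : Int) = I ∧ (j : Int) = (m : Int)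
      · rw [if_pos hij]
        have hj : j = m := by omega
        subst hj
        rw [ihg i j, if_neg (by omega), if_pos ⟨hij.1, by omega⟩,
          show g2 st.1 i j + g2 tm I.toNat j = g2 st.1 i j + g2 tm i j by
            rw [show I.toNat = i by omega]]
      · rw [if_neg hij, ihg i j]
        by_cases hc : (i : Int) = I ∧ j < m
        · rw [if_pos hc, if_pos ⟨hc.1, by omega⟩]
        · rw [if_neg hc, if_neg ?_]
          rintro ⟨hA, hB⟩
          by_cases hjm : j < m
          · exact hc ⟨hA, hjm⟩
          · exact hij ⟨hA, by omega⟩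
    · rw [hrd2, iha, Finset.sum_range_succ]
      split_ifs <;> ring

theorem finOuter (tm : List (List Int)) (b0 : List (List Int))
    (M : ℕ) (hM : M ≤ b0.length) :
    ((PySem.List.pyRange 0 (M : Int) 1).foldl (finRow tm) (b0, 0)).1.length = b0.length ∧
      (∀ i : ℕ, lenR ((PySem.List.pyRange 0 (M : Int) 1).foldl (finRow tm) (b0, 0)).1 i = lenR b0 i) ∧
      (∀ i j : ℕ, (M : Int) ≤ (i : Int) →
        g2 ((PySem.List.pyRange 0 (M : Int) 1).foldl (finRow tm) (b0, 0)).1 i j = g2 b0 i j) ∧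
      ((PySem.List.pyRange 0 (M : Int) 1).foldl (finRow tm) (b0, 0)).2 =
        ∑ i ∈ Finset.range M, ∑ j ∈ Finset.range (lenR b0 i),
          (if 0 < g2 b0 i j + g2 tm i j then 1 else 0) := by
  induction M with
  | zero =>
    rw [Nat.cast_zero, PySem.List.pyRange_one_eq_nil le_rfl]
    exact ⟨rfl, fun i => rfl, fun i j _ => by rw [List.foldl_nil], by simp⟩
  | succ M ihM =>
    obtain ⟨ihL, ihP, ihun, iha⟩ := ihM (by omega)
    have hsplit : PySem.List.pyRange 0 ((M + 1 : ℕ) : Int) 1 =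
        PySem.List.pyRange 0 ((M : ℕ) : Int) 1 ++ [(M : Int)] := by
      push_cast
      exact PySem.List.pyRange_one_succ_right (by omega)
    rw [hsplit, List.foldl_append]
    simp only [List.foldl_cons, List.foldl_nil]
    set F := (PySem.List.pyRange 0 ((M : ℕ) : Int) 1).foldl (finRow tm) (b0, 0) with hF
    have hrowlen : ((PySem.List.pyGetD F.1 (M : Int) []).length : Int) = ((lenR b0 M : ℕ) : Int) := by
      rw [pyGetD_nn _ _ _ (by omega), Int.toNat_natCast]
      have := ihP M
      unfold lenR at this ⊢
      rw [this]
    have haux := finRow_aux tm (M : Int) (by omega) (lenR b0 M) F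
      (by rw [ihL]; omega)
      (by rw [Int.toNat_natCast]
          have := ihP M
          unfold lenR at this
          rw [this]
          unfold lenR
          omega)
    have hpass : finRow tm F (M : Int) =
        (PySem.List.pyRange 0 ((lenR b0 M : ℕ) : Int) 1).foldl (finStep tm (M : Int)) F := by
      rw [finRow, hrowlen]
    rw [hpass]
    obtain ⟨auxL, auxP, auxg, auxa⟩ := haux
    refine ⟨by rw [auxL, ihL], fun i => by rw [auxP i, ihP i], fun i j hi => ?_, ?_⟩
    · rw [auxg i j, if_neg (by omega), ihun i j (by omega)]
    · rw [auxa, iha, Finset.sum_range_succ, Int.toNat_natCast]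
      congr 1
      apply Finset.sum_congr rfl
      intro j hj
      rw [ihun M j (by omega)]

-- ---- B side ----
theorem bumpC_aux (delta R c1 : Int) (hR : 0 ≤ R) (hc1 : 0 ≤ c1)
    (m : ℕ) (b : List (List Int)) (hRn : R < (b.length : Int))
    (hcb : c1 + m ≤ ((b.getD R.toNat []).length : Int)) :
    ((PySem.List.pyRange c1 (c1 + m) 1).foldl (bumpC delta R) b).length = b.length ∧
      (∀ i : ℕ, lenR ((PySem.List.pyRange c1 (c1 + m) 1).foldl (bumpC delta R) b) i = lenR b i) ∧
      ∀ i j : ℕ, g2 ((PySem.List.pyRange c1 (c1 + m) 1).foldl (bumpC delta R) b) i j =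
        if (i : Int) = R ∧ c1 ≤ (j : Int) ∧ (j : Int) < c1 + m then g2 b i j + delta
        else g2 b i j := by
  induction m with
  | zero =>
    rw [Nat.cast_zero, add_zero, PySem.List.pyRange_one_eq_nil le_rfl]
    refine ⟨rfl, fun i => rfl, fun i j => ?_⟩
    rw [List.foldl_nil, if_neg (by omega)]
  | succ m ihm =>
    obtain ⟨ihL, ihP, ihg⟩ := ihm (by push_cast at hcb ⊢; omega)
    have hsplit : PySem.List.pyRange c1 (c1 + ((m + 1 : ℕ) : Int)) 1 =
        PySem.List.pyRange c1 (c1 + ((m : ℕ) : Int)) 1 ++ [c1 + (m : Int)] := by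
      push_cast
      rw [show c1 + ((m : Int) + 1) = (c1 + (m : Int)) + 1 by ring]
      exact PySem.List.pyRange_one_succ_right (by omega)
    rw [hsplit, List.foldl_append]
    simp only [List.foldl_cons, List.foldl_nil]
    set F := (PySem.List.pyRange c1 (c1 + ((m : ℕ) : Int)) 1).foldl (bumpC delta R) b with hF
    have hFr : ((F.getD R.toNat []).length : Int) = ((b.getD R.toNat []).length : Int) := by
      have := ihP R.toNat
      unfold lenR at this
      rw [this]
    refine ⟨by unfold bumpC; rw [len_add2, ihL],
      fun i => by unfold bumpC; rw [lenR_add2 _ _ _ _ hR, ihP i], fun i j => ?_⟩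
    unfold bumpC
    rw [g2_add2g F R (c1 + (m : Int)) _ hR (by rw [ihL]; omega) (by omega)
      (by rw [hFr]; push_cast at hcb ⊢; omega) i j, ihg i j]
    by_cases hij : (i : Int) = R ∧ (j : Int) = c1 + (m : Int)
    · rw [if_pos hij, if_neg (by omega), if_pos (by push_cast; omega)]
    · by_cases hc : (i : Int) = R ∧ c1 ≤ (j : Int) ∧ (j : Int) < c1 + (m : Int)
      · rw [if_neg hij, if_pos hc, if_pos (by push_cast; omega)]
      · rw [if_neg hij, if_neg hc, if_neg ?_]
        rintro ⟨hA, hB, hC⟩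
        by_cases hjm : (j : Int) < c1 + (m : Int)
        · exact hc ⟨hA, hB, hjm⟩
        · exact hij ⟨hA, by push_cast at hC; omega⟩

theorem bumpR_aux (delta r1 c1 c2 : Int) (hr1 : 0 ≤ r1) (hc1 : 0 ≤ c1) (hc12 : c1 ≤ c2)
    (m : ℕ) (b : List (List Int)) (hrm : r1 + m ≤ (b.length : Int))
    (hcov : ∀ k : ℕ, r1 ≤ (k : Int) → (k : Int) < r1 + m →
      c2 + 1 ≤ ((b.getD k []).length : Int)) :
    ((PySem.List.pyRange r1 (r1 + m) 1).foldl (bumpR delta c1 c2) b).length = b.length ∧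
      (∀ i : ℕ, lenR ((PySem.List.pyRange r1 (r1 + m) 1).foldl (bumpR delta c1 c2) b) i = lenR b i) ∧
      ∀ i j : ℕ, g2 ((PySem.List.pyRange r1 (r1 + m) 1).foldl (bumpR delta c1 c2) b) i j =
        if r1 ≤ (i : Int) ∧ (i : Int) < r1 + m ∧ c1 ≤ (j : Int) ∧ (j : Int) ≤ c2 then
          g2 b i j + delta
        else g2 b i j := by
  induction m with
  | zero =>
    rw [Nat.cast_zero, add_zero, PySem.List.pyRange_one_eq_nil le_rfl]
    refine ⟨rfl, fun i => rfl, fun i j => ?_⟩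
    rw [List.foldl_nil, if_neg (by omega)]
  | succ m ihm =>
    obtain ⟨ihL, ihP, ihg⟩ := ihm (by push_cast at hrm ⊢; omega)
      (fun k hk1 hk2 => hcov k hk1 (by push_cast at hk2 ⊢; omega))
    have hsplit : PySem.List.pyRange r1 (r1 + ((m + 1 : ℕ) : Int)) 1 =
        PySem.List.pyRange r1 (r1 + ((m : ℕ) : Int)) 1 ++ [r1 + (m : Int)] := by
      push_cast
      rw [show r1 + ((m : Int) + 1) = (r1 + (m : Int)) + 1 by ring]
      exact PySem.List.pyRange_one_succ_right (by omega)
    rw [hsplit, List.foldl_append]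
    simp only [List.foldl_cons, List.foldl_nil]
    set F := (PySem.List.pyRange r1 (r1 + ((m : ℕ) : Int)) 1).foldl (bumpR delta c1 c2) b with hF
    have hcnt : (c2 + 1) = c1 + (((c2 + 1 - c1).toNat : ℕ) : Int) := by omega
    have hlast : bumpR delta c1 c2 F (r1 + (m : Int)) =
        (PySem.List.pyRange c1 (c1 + (((c2 + 1 - c1).toNat : ℕ) : Int)) 1).foldl
          (bumpC delta (r1 + (m : Int))) F := by
      rw [bumpR, ← hcnt]
    have hrow : ((F.getD (r1 + (m : Int)).toNat []).length : Int) =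
        ((b.getD (r1 + (m : Int)).toNat []).length : Int) := by
      have := ihP (r1 + (m : Int)).toNat
      unfold lenR at this
      rw [this]
    have hbc := bumpC_aux delta (r1 + (m : Int)) c1 (by omega) hc1
      (c2 + 1 - c1).toNat F (by rw [ihL]; push_cast at hrm ⊢; omega)
      (by rw [hrow, ← hcnt]
          exact hcov (r1 + (m : Int)).toNat (by omega) (by push_cast; omega))
    obtain ⟨bcL, bcP, bcg⟩ := hbc
    rw [hlast]
    refine ⟨by rw [bcL, ihL], fun i => by rw [bcP i, ihP i], fun i j => ?_⟩
    rw [bcg i j, ihg i j]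
    by_cases hij : (i : Int) = r1 + (m : Int) ∧ c1 ≤ (j : Int) ∧
        (j : Int) < c1 + (((c2 + 1 - c1).toNat : ℕ) : Int)
    · rw [if_pos hij, if_neg (by omega), if_pos (by push_cast at *; omega)]
    · by_cases hc : r1 ≤ (i : Int) ∧ (i : Int) < r1 + (m : Int) ∧ c1 ≤ (j : Int) ∧ (j : Int) ≤ c2
      · rw [if_neg hij, if_pos hc, if_pos (by push_cast at *; omega)]
      · rw [if_neg hij, if_neg hc, if_neg ?_]
        rintro ⟨hA, hB, hC, hD⟩
        by_cases him : (i : Int) < r1 + (m : Int)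
        · exact hc ⟨hA, him, hC, hD⟩
        · exact hij ⟨by push_cast at hB ⊢; omega, hC, by omega⟩

theorem stepSkillB_spec (b : List (List Int))
    (s : List Int) (hs : skOK b.length s) (hcov : skCov b s) :
    (stepSkillB b s).length = b.length ∧
      (∀ i : ℕ, lenR (stepSkillB b s) i = lenR b i) ∧
      ∀ i j : ℕ, g2 (stepSkillB b s) i j = g2 b i j + rectTerm s i j := by
  obtain ⟨hlen6, hs1⟩ := hs
  rcases s with - | ⟨ty, - | ⟨r1, - | ⟨c1, - | ⟨r2, - | ⟨c2, - | ⟨deg, - | ⟨x, rest⟩⟩⟩⟩⟩⟩⟩ <;>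
    simp only [List.length] at hlen6 <;> try omega
  simp only [List.getD, List.getElem?_cons_succ, List.getElem?_cons_zero, Option.getD_some] at hs1
  unfold skCov at hcov
  simp only [List.getD, List.getElem?_cons_succ, List.getElem?_cons_zero, Option.getD_some,
    List.mem_range] at hcov
  obtain ⟨h1, h2, h3, h4, h5, h6⟩ := hs1
  simp only [stepSkillB]
  have hrn : (r2 + 1) = r1 + (((r2 + 1 - r1).toNat : ℕ) : Int) := by omega
  rw [hrn]
  have hba := bumpR_aux (if ty = 2 then deg else -deg) r1 c1 c2 h1 h4 h5
    (r2 + 1 - r1).toNat b (by omega)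
    (by
      intro k hk1 hk2
      have hkr : (k : Int) ≤ r2 := by omega
      have hkb : k < b.length := by omega
      have := hcov k hkb hk1 hkr
      rw [List.getD_eq_getElem?_getD]
      omega)
  obtain ⟨baL, baP, bag⟩ := hba
  refine ⟨baL, baP, fun i j => ?_⟩
  rw [bag i j]
  simp only [rectTerm]
  split_ifs <;> push_cast at * <;> omega

theorem skillFoldB (board : List (List Int)) (skill : List (List Int))
    (hsk : ∀ s ∈ skill, skOK board.length s ∧ skCov board s) :
    ∀ b : List (List Int), b.length = board.length → (∀ i : ℕ, lenR b i = lenR board i) →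
    (skill.foldl stepSkillB b).length = board.length ∧
      (∀ i : ℕ, lenR (skill.foldl stepSkillB b) i = lenR board i) ∧
      ∀ i j : ℕ, g2 (skill.foldl stepSkillB b) i j = g2 b i j + rect skill i j := by
  induction skill with
  | nil => exact fun b hL hP => ⟨hL, hP, fun i j => by simp [rect]⟩
  | cons s rest ih =>
    intro b hL hP
    have hsOK : skOK b.length s := by
      rw [hL]
      exact (hsk s (by simp)).1
    have hsCov : skCov b s := by
      intro k hk hk1 hk2
      have hkb : k < board.length := by
        simp only [List.mem_range] at hk
        omega
      have := (hsk s (by simp)).2 k (by simpa using hkb) hk1 hk2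
      have hlen : ((b.getD k []).length : Int) = ((board.getD k []).length : Int) := by
        have := hP k
        unfold lenR at this
        rw [this]
      omega
    have hstep := stepSkillB_spec b s hsOK hsCov
    have hrest := ih (fun s' hs' => hsk s' (by simp [hs'])) (stepSkillB b s)
      (by rw [hstep.1, hL]) (fun i => by rw [hstep.2.1 i, hP i])
    refine ⟨hrest.1, hrest.2.1, fun i j => ?_⟩
    simp only [List.foldl_cons]
    rw [hrest.2.2, hstep.2.2]
    simp [rect]
    ring

theorem countRow_spec (row : List Int) (a : Int) :
    countRow a row = a + ∑ j ∈ Finset.range row.length, (if 0 < row.getD j 0 then 1 else 0) := by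
  induction row generalizing a with
  | nil => simp [countRow]
  | cons v row ih =>
    simp only [countRow, List.foldl_cons] at *
    rw [ih, List.length_cons, Finset.sum_range_succ']
    simp only [List.getD_cons_succ, List.getD_cons_zero]
    split_ifs <;> ring

theorem countAll (b : List (List Int)) (a : Int) :
    b.foldl countRow a = a + ∑ i ∈ Finset.range b.length,
      ∑ j ∈ Finset.range ((b.getD i []).length), (if 0 < g2 b i j then 1 else 0) := by
  induction b generalizing a with
  | nil => simp
  | cons r b ih =>
    simp only [List.foldl_cons]
    rw [ih, List.length_cons, Finset.sum_range_succ']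
    simp only [List.getD_cons_succ, List.getD_cons_zero]
    rw [countRow_spec]
    have h0 : ∀ j : ℕ, g2 (r :: b) 0 j = r.getD j 0 := fun j => by simp [g2]
    have hs : ∀ i j : ℕ, g2 (r :: b) (i + 1) j = g2 b i j := fun i j => by simp [g2]
    simp only [h0, hs]
    ring

theorem list_sum_finset_sum {α : Type} (L : List α) (m : ℕ) (F : α → ℕ → Int) :
    (∑ k ∈ Finset.range m, (L.map (fun s => F s k)).sum) =
      (L.map (fun s => ∑ k ∈ Finset.range m, F s k)).sum := by
  induction L with
  | nil => simp
  | cons a L ih => simp [Finset.sum_add_distrib, ih]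

-- ===== VERDICT (by name: the statement is the Claim_ definition above) =====
theorem solution_spec : Claim_equal_solution := by
  intro board skill hDom hPre
  obtain ⟨hrows, hskraw⟩ := hPre
  simp only [Spec_solution, solution, solution_alt]
  set n := board.length with hn
  have hsk : ∀ s ∈ skill, skOK n s := by
    intro s hs
    obtain ⟨a1, a2, a3, a4, a5, a6, a7, -⟩ := hskraw s hs
    exact ⟨a1, a2, a3, a4, a5, a6, a7⟩
  have hskc : ∀ s ∈ skill, skCov board s := by
    intro s hs
    obtain ⟨-, -, -, -, -, -, -, a8⟩ := hskraw s hs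
    exact a8
  set tmp0 := (List.range (n + 1)).map (fun _ => List.replicate (n + 1) (0 : Int)) with htmp0
  have hSh0 : Sh tmp0 (n+1) (n+1) := by
    refine ⟨by simp [htmp0], ?_⟩
    intro r hr
    simp only [htmp0, List.mem_map] at hr
    obtain ⟨-, -, hr⟩ := hr
    simp [← hr]
  have hg0 : ∀ i j : ℕ, g2 tmp0 i j = 0 := by
    intro i j
    unfold g2
    simp only [List.getD_eq_getElem?_getD]
    rcases h : tmp0[i]? with - | r
    · simp
    · have hr : r ∈ tmp0 := List.mem_of_getElem? h
      rw [htmp0] at hr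
      simp only [List.mem_map] at hr
      obtain ⟨-, -, hr⟩ := hr
      rw [Option.getD_some, ← hr, List.getElem?_replicate]
      split_ifs <;> rfl
  obtain ⟨hSh1, hg1⟩ := skillFoldA n skill hsk tmp0 hSh0
  have hb1 : ((List.foldl stepSkillA tmp0 skill).length : Int) - 1 = ((n : ℕ) : Int) := by
    rw [hSh1.1]; push_cast; ring
  rw [hb1]
  set tmp1 := skill.foldl stepSkillA tmp0 with htmp1
  obtain ⟨hSh2, hg2'⟩ := rowOuter n tmp1 hSh1 n le_rfl
  set tmp2 := (PySem.List.pyRange 0 ((n : ℕ) : Int) 1).foldl rowPass tmp1 with htmp2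
  have hb2 : ((PySem.List.pyGetD tmp2 0 []).length : Int) - 1 = ((n : ℕ) : Int) := by
    rw [pyGetD_nn _ _ _ le_rfl]
    rw [show ((0 : Int).toNat) = 0 by rfl, getD_row hSh2 (by omega)]
    push_cast; ring
  rw [hb2]
  obtain ⟨hSh3, hg3'⟩ := colOuter n tmp2 hSh2 n le_rfl
  set tmp3 := (PySem.List.pyRange 0 ((n : ℕ) : Int) 1).foldl colPass tmp2 with htmp3
  obtain ⟨hFL, hFP, hunF, haF⟩ := finOuter tmp3 board n le_rfl
  rw [haF]
  obtain ⟨hBL, hBP, hgB⟩ := skillFoldB board skill (fun s hs => ⟨hsk s hs, hskc s hs⟩)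
    board rfl (fun i => rfl)
  set bb := skill.foldl stepSkillB board with hbb
  rw [countAll bb 0, hBL, zero_add]
  have hrowle : ∀ i : ℕ, i < n → lenR board i ≤ n + 1 := by
    intro i hi
    have hmem : board.getD i [] ∈ board := by
      rw [List.getD_eq_getElem?_getD, List.getElem?_eq_getElem (show i < board.length by omega)]
      simp
    exact hrows _ hmem
  have htm : ∀ i j : ℕ, i < n → j ≤ n → g2 tmp3 i j = rect skill i j := by
    intro i j hi hj
    rcases lt_or_eq_of_le hj with hj' | hj'
    · have e1 : g2 tmp3 i j = colP tmp2 i j := by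
        rw [hg3' i j (by omega), if_pos (by omega : ((j : ℕ) : Int) < ((n : ℕ) : Int))]
      have e2 : colP tmp2 i j = ∑ k ∈ Finset.range (i + 1), rowP tmp1 k j := by
        unfold colP
        apply Finset.sum_congr rfl
        intro k hk
        simp only [Finset.mem_range] at hk
        rw [hg2' k j (by omega), if_pos (by omega : ((k : ℕ) : Int) < ((n : ℕ) : Int))]
      have e3 : ∀ k : ℕ, rowP tmp1 k j = ∑ l ∈ Finset.range (j + 1), corners skill k l := by
        intro k
        unfold rowP
        apply Finset.sum_congr rfl
        intro l hl
        rw [hg1 k l, hg0 k l, zero_add]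
      have e4 : (∑ k ∈ Finset.range (i + 1), ∑ l ∈ Finset.range (j + 1), corners skill k l) =
          rect skill i j := by
        simp only [corners]
        rw [Finset.sum_congr rfl
            (fun k _ => list_sum_finset_sum skill (j + 1) (fun s l => cornerTerm s k l)),
          list_sum_finset_sum skill (i + 1) _]
        simp only [rect]
        congr 1
        apply List.map_congr_left
        intro s hs
        exact doubleSum_corner n s (hsk s hs) i j
      rw [e1, e2, Finset.sum_congr rfl (fun k _ => e3 k), e4]
    · subst hj'
      rw [hg3' i n (by omega), if_neg (by omega), hg2' i n (by omega),
        if_pos (by omega : ((i : ℕ) : Int) < ((n : ℕ) : Int))]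
      have e5 : rowP tmp1 i n = ∑ l ∈ Finset.range (n + 1), corners skill i l := by
        unfold rowP
        apply Finset.sum_congr rfl
        intro l hl
        rw [hg1 i l, hg0 i l, zero_add]
      have e6 : (∑ l ∈ Finset.range (n + 1), corners skill i l) = 0 := by
        simp only [corners]
        rw [list_sum_finset_sum skill (n + 1) (fun s l => cornerTerm s i l)]
        rw [List.map_congr_left (fun s hs => corner_row_sum n s (hsk s hs) i)]
        simp
      have e7 : rect skill i n = 0 := by
        simp only [rect]
        rw [List.map_congr_left (fun s hs => rectTerm_big n s (hsk s hs) i)]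
        simp
      rw [e5, e6, e7]
  calc (∑ i ∈ Finset.range n, ∑ j ∈ Finset.range (lenR board i),
          if 0 < g2 board i j + g2 tmp3 i j then (1 : Int) else 0)
      = ∑ i ∈ Finset.range n, ∑ j ∈ Finset.range ((bb.getD i []).length),
          (if 0 < g2 bb i j then (1 : Int) else 0) := by
        apply Finset.sum_congr rfl
        intro i hi
        simp only [Finset.mem_range] at hi
        rw [show ((bb.getD i []).length) = lenR board i from hBP i]
        apply Finset.sum_congr rfl
        intro j hj
        simp only [Finset.mem_range] at hj
        have hjn : j ≤ n := by
          have := hrowle i hi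
          omega
        rw [hgB i j, htm i j hi hjn]
    _ = _ := rfl
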